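-- pv_equiv track=rewrite | github.com/davidmohaisen/maltemp | src/16-Functions-DetectionMotivation-RF.py | getDic
-- ===== SOURCE A (Python) =====
-- def getDic(x):
--     dic = {}
--     counter = 0
--     for i in range(len(x)):
--         for key in x[i].keys():
--             if (not key in dic) and "fcn." not in key and "loc." not in key and "int." not in key:
--                 dic[key] = counter
--                 counter += 1
--
--     return dic
-- ===== SOURCE B (Python) =====
-- def getDic(x):
--     stream = [k for d in x for k in d.keys()
--               if "fcn." not in k and "loc." not in k and "int." not in k]
--     order = sorted(set(stream), key=stream.index)
--     return {k: i for i, k in enumerate(order)}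
-- ===== Notes on version B (the rewrite author's own statement) =====
-- stated objective: alternative
-- what changed: Instead of A's single pass with a counter and a membership-guarded insertion, B flattens the filtered keys into a stream, takes the distinct keys as a set and SORTS them by their first-occurrence position (stream.index), then assigns indices by one enumeration pass; correctness rests on first-occurrence positions being unique, so the sort reconstructs A's insertion order.
import Mathlib
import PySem

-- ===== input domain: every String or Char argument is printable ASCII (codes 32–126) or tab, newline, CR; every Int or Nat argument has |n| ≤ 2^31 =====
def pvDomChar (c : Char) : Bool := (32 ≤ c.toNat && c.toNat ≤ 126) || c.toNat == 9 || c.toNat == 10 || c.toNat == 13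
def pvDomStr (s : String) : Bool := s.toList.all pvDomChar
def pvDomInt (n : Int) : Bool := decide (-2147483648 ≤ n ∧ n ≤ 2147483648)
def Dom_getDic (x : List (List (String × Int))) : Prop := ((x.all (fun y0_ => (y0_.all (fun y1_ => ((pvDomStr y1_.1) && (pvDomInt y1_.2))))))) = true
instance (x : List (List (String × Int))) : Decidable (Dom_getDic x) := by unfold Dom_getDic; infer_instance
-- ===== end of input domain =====

-- B rebuilds A's dict by sorting the distinct filtered keys by first-occurrence position
-- in the flattened key stream and enumerating, instead of A's counter-guarded insertion loop
-- (objective: alternative algorithm, same return value).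


-- shared filter: the three substring tests both Python versions spell out identically
def pvOk (key : String) : Bool :=
  !(PySem.Str.isIn "fcn." key) && !(PySem.Str.isIn "loc." key) && !(PySem.Str.isIn "int." key)

-- ===== PORT A =====
-- loop body of A: 'if (not key in dic) and … : dic[key] = counter; counter += 1'
def pvStep (st : PySem.Dict String Int × Int) (key : String) : PySem.Dict String Int × Int :=
  if !(st.1.contains key) && pvOk key then (st.1.insert key st.2, st.2 + 1) else st

def getDic (x : List (List (String × Int))) : List (String × Int) :=
  ((PySem.List.pyRange 0 (PySem.List.len x) 1).foldl
    (fun st i => ((PySem.Dict.ofList (PySem.List.pyGetD x i [])).keys).foldl pvStep st)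
    (PySem.Dict.empty, 0)).1.items

-- ===== PORT B =====
-- stream = the flattened filtered keys; order = sorted(set(stream), key=stream.index)
-- (stream.index never raises here since set(stream) ⊆ stream; '.getD 0' only totalises index?)
def getDic_alt (x : List (List (String × Int))) : List (String × Int) :=
  let stream := x.flatMap (fun d => ((PySem.Dict.ofList d).keys).filter pvOk)
  let order := PySem.List.sorted (PySem.Set.ofList stream)
    (fun k => (PySem.List.index? stream k).getD 0) false
  (PySem.List.enumerate order 0).map (fun p => (p.2, p.1))

-- ===== PRECONDITION & SPEC =====
def Spec_getDic (x : List (List (String × Int))) (out : List (String × Int)) : Prop := out = getDic_alt x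
instance (x : List (List (String × Int))) (out : List (String × Int)) : Decidable (Spec_getDic x out) := by unfold Spec_getDic; infer_instance

-- ===== CLAIM =====
def Claim_equal_getDic : Prop := ∀ (x : List (List (String × Int))), Dom_getDic x → Spec_getDic x (getDic x)

-- ===== LEMMAS AND PROOFS =====

-- the assoc list {k : i for i, k in enumerate(t)}
def pvEmap (t : List String) : List (String × Int) :=
  (PySem.List.enumerate t 0).map (fun p => (p.2, p.1))

theorem pvAnyEnum (s : List String) (k : String) (c : Int) :
    (PySem.List.enumerate s c).any (fun p => p.2 == k) = s.any (fun a => a == k) := by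
  induction s generalizing c with
  | nil => simp [PySem.List.enumerate]
  | cons a s ih => simp only [PySem.List.enumerate_cons, List.any_cons, ih]

theorem pvContains_emap (s : List String) (k : String) :
    (PySem.Dict.mk (pvEmap s)).contains k = PySem.Set.contains s k := by
  simp only [PySem.Dict.contains, pvEmap, List.any_map]
  rw [show ((fun (p : String × Int) => p.1 == k) ∘ fun (p : Int × String) => (p.2, p.1))
        = fun (p : Int × String) => p.2 == k from rfl]
  rw [pvAnyEnum]
  simp only [PySem.Set.contains]
  induction s with
  | nil => simp
  | cons a s ih =>
    by_cases h : a = k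
    · simp [List.any_cons, h]
    · simp [List.any_cons, h, Ne.symm h, ih]

theorem pvEmap_append_singleton (s : List String) (k : String) :
    pvEmap (s ++ [k]) = pvEmap s ++ [(k, (s.length : Int))] := by
  simp [pvEmap, PySem.List.enumerate_append, PySem.List.enumerate]

theorem pvLoop (ks : List String) (s : List String) :
    ks.foldl pvStep (PySem.Dict.mk (pvEmap s), (s.length : Int))
      = (PySem.Dict.mk (pvEmap (ks.foldl (fun t k => if pvOk k then PySem.Set.add t k else t) s)),
         ((ks.foldl (fun t k => if pvOk k then PySem.Set.add t k else t) s).length : Int)) := by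
  induction ks generalizing s with
  | nil => rfl
  | cons k ks ih =>
    simp only [List.foldl_cons]
    by_cases hok : pvOk k = true
    · by_cases hc : PySem.Set.contains s k = true
      · have hks : k ∈ s := by simpa [PySem.Set.contains] using hc
        have hcd : (PySem.Dict.mk (pvEmap s)).contains k = true := (pvContains_emap s k).trans hc
        have h1 : pvStep (PySem.Dict.mk (pvEmap s), (s.length : Int)) k
            = (PySem.Dict.mk (pvEmap s), (s.length : Int)) := by
          simp [pvStep, hcd]
        have h2 : PySem.Set.add s k = s := by simp [PySem.Set.add, hks]
        rw [h1]
        simp only [hok, if_true, h2]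
        exact ih s
      · have hks : k ∉ s := by simpa [PySem.Set.contains] using hc
        have hcd : (PySem.Dict.mk (pvEmap s)).contains k = false := by
          rw [pvContains_emap]; simpa [PySem.Set.contains] using hc
        have h1 : pvStep (PySem.Dict.mk (pvEmap s), (s.length : Int)) k
            = (PySem.Dict.mk (pvEmap (s ++ [k])), ((s ++ [k]).length : Int)) := by
          simp [pvStep, hcd, hok, PySem.Dict.insert, pvEmap_append_singleton]
        have h2 : PySem.Set.add s k = s ++ [k] := by simp [PySem.Set.add, hks]
        rw [h1]
        simp only [hok, if_true, h2]
        exact ih (s ++ [k])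
    · have h1 : pvStep (PySem.Dict.mk (pvEmap s), (s.length : Int)) k
          = (PySem.Dict.mk (pvEmap s), (s.length : Int)) := by
        simp [pvStep, hok]
      rw [h1]
      simp only [hok, if_false, Bool.false_eq_true]
      exact ih s

-- an element of the input stream has a first-occurrence index below the stream's length
theorem pvIdx_lt_len (xs : List String) (a : String) (h : a ∈ xs) :
    (PySem.List.index? xs a).getD 0 < xs.length := by
  obtain ⟨m, hm⟩ := Option.isSome_iff_exists.mp ((PySem.List.index?_isSome_iff xs a).mpr h)
  obtain ⟨hlt, -, -⟩ := PySem.List.getElem_of_index?_eq_some hm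
  rw [hm]
  simpa using hlt

-- set(stream) in first-occurrence order is strictly increasing in stream.index
theorem pvOfList_pairwise_idx (xs : List String) :
    (PySem.Set.ofList xs).Pairwise
      (fun a b => (PySem.List.index? xs a).getD 0 < (PySem.List.index? xs b).getD 0) := by
  induction xs using List.reverseRecOn with
  | nil => simp [PySem.Set.ofList]
  | append_singleton xs k ih =>
    have hofl : PySem.Set.ofList (xs ++ [k]) = PySem.Set.add (PySem.Set.ofList xs) k := by
      rw [PySem.Set.ofList_eq_foldl, PySem.Set.ofList_eq_foldl, List.foldl_append]; rfl
    have hsub : ∀ a, a ∈ PySem.Set.ofList xs → a ∈ xs := by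
      intro a ha; exact (PySem.Set.mem_ofList xs a).mp ha
    have hidx : ∀ a ∈ PySem.Set.ofList xs,
        PySem.List.index? (xs ++ [k]) a = PySem.List.index? xs a := by
      intro a ha; exact PySem.List.index?_append_of_mem [k] (hsub a ha)
    have ih' : (PySem.Set.ofList xs).Pairwise
        (fun a b => (PySem.List.index? (xs ++ [k]) a).getD 0
          < (PySem.List.index? (xs ++ [k]) b).getD 0) := by
      refine ih.imp_of_mem ?_
      intro a b ha hb hab
      rw [hidx a ha, hidx b hb]; exact hab
    by_cases hk : k ∈ xs
    · have : PySem.Set.add (PySem.Set.ofList xs) k = PySem.Set.ofList xs := by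
        simp [PySem.Set.add, PySem.Set.mem_ofList, hk]
      rw [hofl, this]; exact ih'
    · have hadd : PySem.Set.add (PySem.Set.ofList xs) k = PySem.Set.ofList xs ++ [k] := by
        simp [PySem.Set.add, PySem.Set.mem_ofList, hk]
      rw [hofl, hadd, List.pairwise_append]
      refine ⟨ih', List.pairwise_singleton _ _, ?_⟩
      intro a ha b hb
      have hb' : b = k := List.mem_singleton.mp hb
      rw [hb', hidx a ha, PySem.List.index?_append_singleton_self xs k hk]
      simpa using pvIdx_lt_len xs a (hsub a ha)

-- the sort by first-occurrence index reconstructs first-appearance (dedup) order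
theorem pvSorted_eq_dedup (xs : List String) :
    PySem.List.sorted (PySem.Set.ofList xs)
      (fun k => (PySem.List.index? xs k).getD 0) false = PySem.Set.ofList xs :=
  PySem.List.sorted_eq_of_perm_of_pairwise_lt _ _ _ (List.Perm.refl _) (pvOfList_pairwise_idx xs)

-- ===== VERDICT (by name: the statement is the Claim_ definition above) =====
theorem getDic_spec : Claim_equal_getDic := by
  intro x _
  unfold Spec_getDic getDic getDic_alt
  rw [show (0 : Int) = ((0 : Int)) from rfl]
  rw [PySem.List.foldl_pyRange_pyGetD x []
        (fun st d => ((PySem.Dict.ofList d).keys).foldl pvStep st)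
        (PySem.Dict.empty, 0) le_rfl]
  simp only [Int.toNat_zero, List.drop_zero]
  rw [← List.foldl_flatMap (f := fun d => (PySem.Dict.ofList d).keys) (g := pvStep)]
  have h0 : (PySem.Dict.empty : PySem.Dict String Int) = PySem.Dict.mk (pvEmap []) := rfl
  have h1 := pvLoop (x.flatMap (fun d => (PySem.Dict.ofList d).keys)) []
  simp only [List.length_nil, Nat.cast_zero] at h1
  rw [h0, h1]
  rw [pvSorted_eq_dedup]
  rw [← List.filter_flatMap, PySem.Set.ofList_eq_foldl, List.foldl_filter]
  rfl
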